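-- pv_equiv track=rewrite | github.com/Zerins/Information-theory-and-coding | hamming_code.py | even_parity
-- ===== SOURCE A (Python) =====
-- def even_parity(redundant_pos, total_bits, code_list):
--     interval = redundant_pos + 1
--     initial_pos = redundant_pos
--     sum_of_one = 0
--     for i in range(initial_pos, total_bits, (interval*2)):
--         for k in range(interval):
--             pos = i + k
--             if pos > (total_bits-1):
--                 break
--             bit = code_list[pos]
--             sum_of_one += bit
--     if sum_of_one % 2 == 1:
--         code_list[redundant_pos] = 1
--
--     return code_list
-- ===== SOURCE B (Python) =====
-- def even_parity(redundant_pos, total_bits, code_list):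
--     # One flat pass: bit at pos belongs to parity group `redundant_pos` exactly
--     # when ((pos+1) // (redundant_pos+1)) is odd.  (Mutates code_list in place, like A.)
--     interval = redundant_pos + 1
--     sum_of_one = 0
--     for pos in range(redundant_pos, total_bits):
--         if ((pos + 1) // interval) % 2 == 1:
--             sum_of_one += code_list[pos]
--     if sum_of_one % 2 == 1:
--         code_list[redundant_pos] = 1
--     return code_list
-- ===== Notes on version B (the rewrite author's own statement) =====
-- stated objective: simpler
-- what changed: Replaces A's nested block-stepping loops (outer stride 2*interval, inner scan with a bounds break) by a single flat pass over all positions that selects a bit arithmetically via the parity of (pos+1)//interval.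
-- outside the precondition, e.g. on even_parity(-3, 2, [0, 1, 0]): A returns [0, 1, 0], B returns [1, 1, 0]; on even_parity(2, 8, [0, 0, 1, 0, 1]): A returns [0, 0, 1, 0, 1], B returns [0, 0, 1, 0, 1]
import Mathlib
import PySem

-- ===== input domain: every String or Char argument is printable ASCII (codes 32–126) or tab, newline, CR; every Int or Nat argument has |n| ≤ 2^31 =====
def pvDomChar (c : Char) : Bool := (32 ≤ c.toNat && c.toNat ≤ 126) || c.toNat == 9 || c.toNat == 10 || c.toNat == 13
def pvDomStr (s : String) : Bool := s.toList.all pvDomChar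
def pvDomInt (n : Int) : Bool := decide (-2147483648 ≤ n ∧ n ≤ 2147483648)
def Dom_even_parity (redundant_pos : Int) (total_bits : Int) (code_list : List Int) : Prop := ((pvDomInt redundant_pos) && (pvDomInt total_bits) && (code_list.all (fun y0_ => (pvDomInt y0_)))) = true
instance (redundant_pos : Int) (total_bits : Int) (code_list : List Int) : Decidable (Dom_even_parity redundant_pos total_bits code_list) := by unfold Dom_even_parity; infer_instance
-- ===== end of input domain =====

-- B replaces A's nested block-stepping loops by one flat pass selecting bits via the parity
-- of (pos+1)//(redundant_pos+1); same cost, simpler decomposition. Both A and B mutate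
-- code_list in place in Python (the same write); the equivalence proved is about the return value.


-- ===== PORT A =====
-- inner 'for k in range(interval): … break' loop of A, carried as structural recursion over the k-list
def epInner (ks : List Int) (i : Int) (total_bits : Int) (code_list : List Int) (s : Int) : Int :=
  match ks with
  | [] => s
  | k :: rest =>
    if i + k > total_bits - 1 then s
    else epInner rest i total_bits code_list (s + PySem.List.pyGetD code_list (i + k) 0)

def even_parity (redundant_pos : Int) (total_bits : Int) (code_list : List Int) : List Int :=
  let interval := redundant_pos + 1
  let initial_pos := redundant_pos
  let sum_of_one :=
    (PySem.List.pyRange initial_pos total_bits (interval * 2)).foldl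
      (fun s i => epInner (PySem.List.pyRange 0 interval 1) i total_bits code_list s) 0
  if PySem.Int.mod sum_of_one 2 = 1 then PySem.List.pySetD code_list redundant_pos 1 else code_list

-- ===== PORT B =====
def even_parity_alt (redundant_pos : Int) (total_bits : Int) (code_list : List Int) : List Int :=
  let interval := redundant_pos + 1
  let sum_of_one :=
    (PySem.List.pyRange redundant_pos total_bits 1).foldl
      (fun s pos =>
        if PySem.Int.mod (PySem.Int.floordiv (pos + 1) interval) 2 = 1 then
          s + PySem.List.pyGetD code_list pos 0
        else s) 0
  if PySem.Int.mod sum_of_one 2 = 1 then PySem.List.pySetD code_list redundant_pos 1 else code_list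

-- ===== PRECONDITION & SPEC =====
-- Pre_ excludes negative redundant_pos (interval ≤ 0: A raises ValueError for redundant_pos = -1,
-- and for redundant_pos < -1 its unchanged-list return comes from an accidentally empty inner
-- range(interval), an artefact B does not share), and total_bits beyond both len(code_list) and
-- redundant_pos (A generally raises IndexError there; on block patterns that happen to skip every
-- out-of-range position it returns the list unchanged, as does B).
def Pre_even_parity (redundant_pos : Int) (total_bits : Int) (code_list : List Int) : Prop :=
  0 ≤ redundant_pos ∧ (total_bits ≤ (code_list.length : Int) ∨ total_bits ≤ redundant_pos)
instance (redundant_pos : Int) (total_bits : Int) (code_list : List Int) : Decidable (Pre_even_parity redundant_pos total_bits code_list) := by unfold Pre_even_parity; infer_instance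
def pvWitness_even_parity : Int × Int × List Int := (2, 7, [1, 0, 1, 1, 0, 1, 0])

def Spec_even_parity (redundant_pos : Int) (total_bits : Int) (code_list : List Int) (out : List Int) : Prop := out = even_parity_alt redundant_pos total_bits code_list
instance (redundant_pos : Int) (total_bits : Int) (code_list : List Int) (out : List Int) : Decidable (Spec_even_parity redundant_pos total_bits code_list out) := by unfold Spec_even_parity; infer_instance

-- ===== CLAIM (what is proved, stated in full; the proofs are below) =====
def Claim_equal_even_parity : Prop := ∀ (redundant_pos : Int) (total_bits : Int) (code_list : List Int), Dom_even_parity redundant_pos total_bits code_list → Pre_even_parity redundant_pos total_bits code_list → Spec_even_parity redundant_pos total_bits code_list (even_parity redundant_pos total_bits code_list)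

-- ===== LEMMAS AND PROOFS =====

-- B's selector and the raw bit read, as named functions for the lemmas
def hFun (I : Int) (cl : List Int) (p : Int) : Int :=
  if PySem.Int.mod (PySem.Int.floordiv (p + 1) I) 2 = 1 then PySem.List.pyGetD cl p 0 else 0
def gFun (cl : List Int) (p : Int) : Int := PySem.List.pyGetD cl p 0

lemma pyRange_nil_of_pos (a b s : Int) (hba : b ≤ a) (hs : 0 < s) :
    PySem.List.pyRange a b s = [] := by
  rw [PySem.List.pyRange_of_pos a b hs]
  simp [show ¬ a < b by omega]

lemma pyRange_cons_of_pos (a b s : Int) (hab : a < b) (hs : 0 < s) :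
    PySem.List.pyRange a b s = a :: PySem.List.pyRange (a + s) b s := by
  rw [PySem.List.pyRange_of_pos a b hs, PySem.List.pyRange_of_pos (a + s) b hs]
  have hdiv : (b - a + s - 1) / s = (b - a - 1) / s + 1 := by
    have : b - a + s - 1 = (b - a - 1) + 1 * s := by ring
    rw [this, Int.add_mul_ediv_right _ _ (by omega : s ≠ 0)]
  by_cases h2 : a + s < b
  · have hq : 0 ≤ (b - a - 1) / s := Int.ediv_nonneg (by omega) (by omega)
    rw [if_pos hab, if_pos h2, hdiv]
    have hts : ((b - a - 1) / s + 1).toNat = ((b - (a + s) + s - 1) / s).toNat + 1 := by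
      have : b - (a + s) + s - 1 = b - a - 1 := by ring
      rw [this]; omega
    rw [hts, List.range_succ_eq_map, List.map_cons]
    simp only [Nat.cast_zero, mul_zero, add_zero, List.map_map]
    refine congrArg (a :: ·) (List.map_congr_left fun k _ => ?_)
    simp only [Function.comp_apply, Nat.cast_succ]
    ring
  · have hq0 : (b - a - 1) / s = 0 := Int.ediv_eq_zero_of_lt (by omega) (by omega)
    rw [if_pos hab, if_neg h2, hdiv, hq0]
    simp

lemma epInner_spec (i total_bits : Int) (cl : List Int) :
    ∀ n : Nat, ∀ a b s : Int, (b - a).toNat ≤ n →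
      epInner (PySem.List.pyRange a b 1) i total_bits cl s
        = s + ((PySem.List.pyRange (i + a) (min (i + b) total_bits) 1).map (gFun cl)).sum := by
  intro n
  induction n with
  | zero =>
    intro a b s hn
    rw [PySem.List.pyRange_one_eq_nil (by omega : b ≤ a),
        PySem.List.pyRange_one_eq_nil (by omega : min (i + b) total_bits ≤ i + a)]
    simp [epInner]
  | succ n ih =>
    intro a b s hn
    by_cases hab : a < b
    · rw [PySem.List.pyRange_one_cons hab]
      simp only [epInner]
      by_cases hbrk : i + a > total_bits - 1
      · rw [if_pos hbrk,
            PySem.List.pyRange_one_eq_nil (by omega : min (i + b) total_bits ≤ i + a)]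
        simp
      · rw [if_neg hbrk, ih (a + 1) b _ (by omega)]
        have e1 : i + (a + 1) = i + a + 1 := by ring
        rw [e1, PySem.List.pyRange_one_cons (by omega : i + a < min (i + b) total_bits)]
        simp only [List.map_cons, List.sum_cons, gFun]
        ring
    · rw [PySem.List.pyRange_one_eq_nil (by omega : b ≤ a),
          PySem.List.pyRange_one_eq_nil (by omega : min (i + b) total_bits ≤ i + a)]
      simp [epInner]

-- the selector's value on a bracketed position
lemma floordiv_mod_two (I p q : Int) (hI : 0 < I) (hlo : q * I ≤ p + 1) (hhi : p + 1 < (q + 1) * I) :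
    PySem.Int.mod (PySem.Int.floordiv (p + 1) I) 2 = q % 2 := by
  have h1 : PySem.Int.floordiv (p + 1) I = q :=
    (PySem.Int.floordiv_eq_iff_of_pos hI).mpr ⟨hlo, hhi⟩
  rw [h1, PySem.Int.mod_eq_emod_of_pos (by omega)]

-- the equality of A's block-stepped sums with B's flat selected sums, from block j on
lemma key (I tb : Int) (cl : List Int) (hI : 0 < I) :
    ∀ n : Nat, ∀ j : Int, 0 ≤ j → (tb - (I - 1 + 2 * I * j)).toNat ≤ n →
      ((PySem.List.pyRange (I - 1 + 2 * I * j) tb (I * 2)).map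
          (fun i => ((PySem.List.pyRange i (min (i + I) tb) 1).map (gFun cl)).sum)).sum
        = ((PySem.List.pyRange (I - 1 + 2 * I * j) tb 1).map (hFun I cl)).sum := by
  intro n
  induction n with
  | zero =>
    intro j hj hn
    rw [pyRange_nil_of_pos _ _ _ (by omega) (by omega),
        PySem.List.pyRange_one_eq_nil (by omega)]
    simp
  | succ n ih =>
    intro j hj hn
    set L := I - 1 + 2 * I * j with hLdef
    by_cases hLtb : L < tb
    · have e1 : (2 * j + 1) * I = L + 1 := by rw [hLdef]; ring
      have e2 : (2 * j + 1 + 1) * I = L + 1 + I := by rw [hLdef]; ring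
      have e3 : (2 * j + 2) * I = L + 1 + I := by rw [hLdef]; ring
      have e4 : (2 * j + 2 + 1) * I = L + 1 + 2 * I := by rw [hLdef]; ring
      have hstep : L + I * 2 = I - 1 + 2 * I * (j + 1) := by rw [hLdef]; ring
      have hpiece1 : ((PySem.List.pyRange L (min (L + I) tb) 1).map (hFun I cl)).sum
          = ((PySem.List.pyRange L (min (L + I) tb) 1).map (gFun cl)).sum := by
        refine congrArg List.sum (List.map_congr_left fun p hp => ?_)
        rw [PySem.List.mem_pyRange_one] at hp
        unfold hFun gFun
        rw [floordiv_mod_two I p (2 * j + 1) hI (by omega) (by omega),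
            if_pos (by omega : (2 * j + 1) % 2 = 1)]
      have hpiece2 : ((PySem.List.pyRange (min (L + I) tb) (min (L + I * 2) tb) 1).map (hFun I cl)).sum = 0 := by
        refine List.sum_eq_zero fun x hx => ?_
        obtain ⟨p, hp, rfl⟩ := List.mem_map.mp hx
        rw [PySem.List.mem_pyRange_one] at hp
        have h2I : L + I * 2 = L + 2 * I := by ring
        rw [h2I] at hp
        unfold hFun
        rw [floordiv_mod_two I p (2 * j + 2) hI (by omega) (by omega),
            if_neg (by omega : ¬ (2 * j + 2) % 2 = 1)]
      have hM2 : PySem.List.pyRange (L + I * 2) tb 1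
          = PySem.List.pyRange (min (L + I * 2) tb) tb 1 := by
        by_cases h : L + I * 2 ≤ tb
        · rw [min_eq_left h]
        · rw [min_eq_right (by omega), PySem.List.pyRange_one_eq_nil (by omega),
              PySem.List.pyRange_one_eq_nil (by omega)]
      rw [pyRange_cons_of_pos L tb (I * 2) hLtb (by omega)]
      simp only [List.map_cons, List.sum_cons]
      rw [hstep, ih (j + 1) (by omega) (by omega), ← hstep, hM2,
          PySem.List.pyRange_one_append L (min (L + I * 2) tb) tb (by omega) (by omega),
          PySem.List.pyRange_one_append L (min (L + I) tb) (min (L + I * 2) tb) (by omega) (by omega)]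
      simp only [List.map_append, List.sum_append]
      rw [hpiece1, hpiece2]
      ring
    · rw [pyRange_nil_of_pos _ _ _ (by omega) (by omega),
          PySem.List.pyRange_one_eq_nil (by omega)]
      simp

-- ===== VERDICT (by name: the statement is the Claim_ definition above) =====
theorem even_parity_spec : Claim_equal_even_parity := by
  intro rp tb cl _hdom hpre
  obtain ⟨hrp, _⟩ := hpre
  show even_parity rp tb cl = even_parity_alt rp tb cl
  simp only [even_parity, even_parity_alt]
  set I := rp + 1 with hI
  have hIpos : 0 < I := by omega
  -- A's sum
  have hAfun : (fun (s i : Int) => epInner (PySem.List.pyRange 0 I 1) i tb cl s)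
      = fun s i => s + ((PySem.List.pyRange i (min (i + I) tb) 1).map (gFun cl)).sum := by
    funext s i
    have := epInner_spec i tb cl I.toNat 0 I s (by omega)
    simpa using this
  rw [hAfun, PySem.List.foldl_add]
  -- B's sum
  have hBfun : (fun (s pos : Int) =>
        if PySem.Int.mod (PySem.Int.floordiv (pos + 1) I) 2 = 1 then s + PySem.List.pyGetD cl pos 0 else s)
      = fun s pos => s + hFun I cl pos := by
    funext s pos
    unfold hFun
    split <;> simp
  rw [hBfun, PySem.List.foldl_add]
  have hrpL : rp = I - 1 + 2 * I * 0 := by rw [hI]; ring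
  have hkey := key I tb cl hIpos (tb - (I - 1 + 2 * I * 0)).toNat 0 (le_refl 0) (le_refl _)
  rw [hrpL, hkey]
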